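-- pv_equiv track=rewrite | github.com/balarooty/comfyui-frameweaver | utils/validation.py | nearest_valid_frame_count
-- ===== SOURCE A (Python) =====
-- def nearest_valid_frame_count(value: int, minimum: int = 9, maximum: int = 241) -> int:
--     frames = int(round(value))
--     frames = max(minimum, min(maximum, frames))
--     remainder = (frames - 1) % 8
--     lower = frames - remainder
--     upper = lower + 8
--     candidates = [c for c in (lower, upper) if minimum <= c <= maximum and (c - 1) % 8 == 0]
--     if not candidates:
--         return minimum
--     return min(candidates, key=lambda c: (abs(c - frames), c))
-- ===== SOURCE B (Python) =====
-- def nearest_valid_frame_count(value: int, minimum: int = 9, maximum: int = 241) -> int: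
--     frames = max(minimum, min(maximum, int(round(value))))
--     lo = minimum + (1 - minimum) % 8          # smallest valid frame >= minimum
--     hi = maximum - (maximum - 1) % 8          # largest valid frame <= maximum
--     if lo > hi:                               # no valid frame in the window
--         return minimum
--     snapped = 1 + 8 * ((frames + 2) // 8)     # nearest c with (c-1)%8==0, ties toward the lower one
--     return max(lo, min(hi, snapped))
-- ===== Notes on version B (the rewrite author's own statement) =====
-- stated objective: simpler
-- what changed: Replaces A's bracket construction (two candidates collected in a filtered list and selected with min over the key (abs(c-frames), c)) with a closed-form snap: compute the valid-frame window bounds, snap frames with one rounding integer division whose ties fall to the lower candidate, and clamp into the window.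
import Mathlib
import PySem

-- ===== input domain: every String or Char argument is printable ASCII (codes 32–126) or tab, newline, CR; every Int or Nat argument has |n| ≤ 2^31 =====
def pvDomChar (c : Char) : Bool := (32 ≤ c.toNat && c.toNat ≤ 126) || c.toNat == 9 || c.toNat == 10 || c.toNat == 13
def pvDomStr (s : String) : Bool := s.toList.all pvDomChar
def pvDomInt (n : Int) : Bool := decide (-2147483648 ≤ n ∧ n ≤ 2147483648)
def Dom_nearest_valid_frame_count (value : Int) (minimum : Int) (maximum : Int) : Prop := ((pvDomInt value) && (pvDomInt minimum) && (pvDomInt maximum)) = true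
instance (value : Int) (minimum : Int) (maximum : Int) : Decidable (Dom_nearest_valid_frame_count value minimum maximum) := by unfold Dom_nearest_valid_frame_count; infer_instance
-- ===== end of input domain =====

-- B replaces A's two-candidate list filter + min-by-key with a closed-form snap (rounding
-- division) clamped into the valid-frame window; objective: simpler.

-- ===== PORT A =====
def nearest_valid_frame_count (value : Int) (minimum : Int) (maximum : Int) : Int :=
  let frames := value                                  -- int(round(value)) on an int is the int itself
  let frames := max minimum (min maximum frames)
  let remainder := PySem.Int.mod (frames - 1) 8
  let lower := frames - remainder
  let upper := lower + 8
  let candidates := [lower, upper].filter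
    (fun c => decide (minimum ≤ c) && decide (c ≤ maximum) && decide (PySem.Int.mod (c - 1) 8 = 0))
  if candidates = [] then minimum
  else (PySem.List.min2? candidates (fun c => |c - frames|) (fun c => c)).getD 0

-- ===== PORT B =====
def nearest_valid_frame_count_alt (value : Int) (minimum : Int) (maximum : Int) : Int :=
  let frames := max minimum (min maximum value)
  let lo := minimum + PySem.Int.mod (1 - minimum) 8
  let hi := maximum - PySem.Int.mod (maximum - 1) 8
  if lo > hi then minimum
  else
    let snapped := 1 + 8 * PySem.Int.floordiv (frames + 2) 8
    max lo (min hi snapped)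

-- ===== PRECONDITION & SPEC =====
def Spec_nearest_valid_frame_count (value : Int) (minimum : Int) (maximum : Int) (out : Int) : Prop := out = nearest_valid_frame_count_alt value minimum maximum
instance (value : Int) (minimum : Int) (maximum : Int) (out : Int) : Decidable (Spec_nearest_valid_frame_count value minimum maximum out) := by unfold Spec_nearest_valid_frame_count; infer_instance

-- ===== CLAIM (what is proved, stated in full; the proofs are below) =====
def Claim_equal_nearest_valid_frame_count : Prop := ∀ (value : Int) (minimum : Int) (maximum : Int), Dom_nearest_valid_frame_count value minimum maximum → Spec_nearest_valid_frame_count value minimum maximum (nearest_valid_frame_count value minimum maximum)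

-- ===== LEMMAS AND PROOFS =====

-- ===== VERDICT (by name: the statement is the Claim_ definition above) =====
theorem nearest_valid_frame_count_spec : Claim_equal_nearest_valid_frame_count := by
  intro value minimum maximum _
  unfold Spec_nearest_valid_frame_count nearest_valid_frame_count nearest_valid_frame_count_alt
  simp only [PySem.Int.mod_eq_emod_of_pos (show (0:Int) < 8 by norm_num),
             PySem.Int.floordiv_eq_ediv_of_pos (show (0:Int) < 8 by norm_num)]
  set f := max minimum (min maximum value) with hf
  have hff : minimum ≤ f ∧ (minimum ≤ maximum → f ≤ maximum) ∧ (maximum < minimum → f = minimum) := by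
    rw [hf]; omega
  clear_value f
  clear hf
  obtain ⟨hf1, hf2, hf3⟩ := hff
  have hm1 : (0:Int) ≤ (f - 1) % 8 := Int.emod_nonneg _ (by norm_num)
  have hm2 : (f - 1) % 8 < 8 := Int.emod_lt_of_pos _ (by norm_num)
  have hq : (f + 2) % 8 + 8 * ((f + 2) / 8) = f + 2 := Int.emod_add_mul_ediv _ _
  have hq1 : (0:Int) ≤ (f + 2) % 8 := Int.emod_nonneg _ (by norm_num)
  have hq2 : (f + 2) % 8 < 8 := Int.emod_lt_of_pos _ (by norm_num)
  have hdm : (f - 1) % 8 + 8 * ((f - 1) / 8) = f - 1 := Int.emod_add_mul_ediv _ _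
  have hdd : (1 - minimum) % 8 + 8 * ((1 - minimum) / 8) = 1 - minimum := Int.emod_add_mul_ediv _ _
  have hd1 : (0:Int) ≤ (1 - minimum) % 8 := Int.emod_nonneg _ (by norm_num)
  have hd2 : (1 - minimum) % 8 < 8 := Int.emod_lt_of_pos _ (by norm_num)
  have hde : (maximum - 1) % 8 + 8 * ((maximum - 1) / 8) = maximum - 1 := Int.emod_add_mul_ediv _ _
  have he1 : (0:Int) ≤ (maximum - 1) % 8 := Int.emod_nonneg _ (by norm_num)
  have he2 : (maximum - 1) % 8 < 8 := Int.emod_lt_of_pos _ (by norm_num)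
  have hLm : ((f - (f - 1) % 8 - 1) % 8 : Int) = 0 := by omega
  have hUm : ((f - (f - 1) % 8 + 8 - 1) % 8 : Int) = 0 := by omega
  have habs1 : |f - (f - 1) % 8 - f| = (f - 1) % 8 := by
    have h : f - (f - 1) % 8 - f = -((f - 1) % 8) := by ring
    rw [h, abs_neg, abs_of_nonneg hm1]
  have habs2 : |f - (f - 1) % 8 + 8 - f| = 8 - (f - 1) % 8 := by
    have h : f - (f - 1) % 8 + 8 - f = 8 - (f - 1) % 8 := by ring
    rw [h, abs_of_nonneg (by omega)]
  by_cases hA1 : minimum ≤ f - (f - 1) % 8 <;>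
  by_cases hA2 : f - (f - 1) % 8 ≤ maximum <;>
  by_cases hB1 : minimum ≤ f - (f - 1) % 8 + 8 <;>
  by_cases hB2 : f - (f - 1) % 8 + 8 ≤ maximum <;>
    simp only [List.filter, PySem.List.min2?, List.foldl, hLm, hUm, hA1, hA2, hB1, hB2,
      decide_true, decide_false, Bool.and_true, Bool.and_false, Bool.true_and, Bool.false_and,
      Bool.and_self, habs1, habs2, Option.getD_some, List.cons_ne_nil, reduceCtorEq,
      ite_false, ite_true, if_neg, if_pos, Bool.or_eq_true, Bool.not_eq_true',
      decide_eq_true_eq, decide_eq_false_iff_not, not_lt, ne_eq, not_false_eq_true] <;>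
    split_ifs <;>
    simp_all only [Bool.or_eq_true, decide_eq_true_eq, Bool.and_eq_true, Bool.not_eq_true',
      decide_eq_false_iff_not, not_lt, List.cons_ne_nil, ne_eq, not_false_eq_true,
      Option.getD_some, not_and, not_le, reduceCtorEq, not_true_eq_false, not_false_iff] <;>
    omega
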